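-- pv_equiv track=rewrite | github.com/z-zora0331/djangogirls | device/func/device_detail.py | isNewDeviceId
-- ===== SOURCE A (Python) =====
-- def isNewDeviceId(device_id, json_contents):
--     device_list = []
--     for dev in json_contents:
--         device_list.append(dev['id'])
--
--     if device_id in device_list:
--         return False
--     else:
--         return True
-- ===== SOURCE B (Python) =====
-- def isNewDeviceId(device_id, json_contents):
--     ids = sorted(dev['id'] for dev in json_contents)
--     lo, hi = 0, len(ids)
--     while lo < hi:
--         mid = (lo + hi) // 2
--         if ids[mid] < device_id:
--             lo = mid + 1
--         else:
--             hi = mid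
--     return not (lo < len(ids) and ids[lo] == device_id)
-- ===== Notes on version B (the rewrite author's own statement) =====
-- stated objective: alternative
-- what changed: Instead of collecting ids into a list and testing linear membership, B sorts the ids and decides presence with a hand-written binary search (lower bound then one equality test).
import Mathlib
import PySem

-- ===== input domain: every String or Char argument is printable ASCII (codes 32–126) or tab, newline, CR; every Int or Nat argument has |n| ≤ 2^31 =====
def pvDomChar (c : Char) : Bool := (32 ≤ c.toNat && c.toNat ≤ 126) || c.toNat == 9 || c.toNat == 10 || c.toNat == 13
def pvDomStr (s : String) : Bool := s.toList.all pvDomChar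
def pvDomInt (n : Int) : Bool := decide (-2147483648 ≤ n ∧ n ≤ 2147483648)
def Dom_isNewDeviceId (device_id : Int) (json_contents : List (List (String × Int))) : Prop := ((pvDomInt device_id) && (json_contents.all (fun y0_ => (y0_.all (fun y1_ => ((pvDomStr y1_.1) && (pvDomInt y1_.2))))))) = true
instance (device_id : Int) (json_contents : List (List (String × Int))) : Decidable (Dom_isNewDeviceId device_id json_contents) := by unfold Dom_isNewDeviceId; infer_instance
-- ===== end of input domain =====

-- B replaces the collect-then-linear-membership of A by sort + hand-written binary search (alternative algorithm, not faster).

-- ===== PORT A =====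
-- dev['id']: first-match lookup in the association list (none = KeyError, excluded by Pre_)
def pvGetId (dev : List (String × Int)) : Option Int :=
  match dev with
  | [] => none
  | (k, v) :: rest => if k == "id" then some v else pvGetId rest

def isNewDeviceId (device_id : Int) (json_contents : List (List (String × Int))) : Bool :=
  -- device_list = []; for dev in json_contents: device_list.append(dev['id'])
  let device_list : List (Option Int) :=
    json_contents.foldl (fun acc dev => acc ++ [pvGetId dev]) []
  -- if device_id in device_list: return False else: return True
  if (some device_id) ∈ device_list then false else true

-- ===== PORT B =====
-- the while lo < hi loop of Source B; ids[mid] read with getD (mid is always in range when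
-- lo < hi ≤ len); fuel = hi - lo only makes the recursion structural, it never cuts it short
def pvBsearchAux : Nat → List Int → Int → Nat → Nat → Nat
  | 0, _, _, lo, _ => lo
  | fuel + 1, ids, x, lo, hi =>
    if lo < hi then
      let mid := (lo + hi) / 2
      if ids.getD mid 0 < x then pvBsearchAux fuel ids x (mid + 1) hi
      else pvBsearchAux fuel ids x lo mid
    else lo

def pvBsearch (ids : List Int) (x : Int) (lo hi : Nat) : Nat :=
  pvBsearchAux (hi - lo) ids x lo hi

def isNewDeviceId_alt (device_id : Int) (json_contents : List (List (String × Int))) : Bool :=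
  -- ids = sorted(dev['id'] for dev in json_contents); a record without 'id' raises KeyError in
  -- Python and is excluded by Pre_, so filterMap = the comprehension on every admitted input
  let ids := PySem.List.sorted (json_contents.filterMap pvGetId) (fun x => x) false
  let lo := pvBsearch ids device_id 0 ids.length
  !(decide (lo < ids.length) && (ids.getD lo 0 == device_id))

-- ===== PRECONDITION & SPEC =====
-- Pre_ excludes inputs where some record has no 'id' key: there A raises KeyError.
def Pre_isNewDeviceId (device_id : Int) (json_contents : List (List (String × Int))) : Prop :=
  (json_contents.all (fun dev => dev.any (fun p => p.1 == "id"))) = true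
instance (device_id : Int) (json_contents : List (List (String × Int))) : Decidable (Pre_isNewDeviceId device_id json_contents) := by unfold Pre_isNewDeviceId; infer_instance

def pvWitness_isNewDeviceId : Int × (List (List (String × Int))) :=
  (3, [[("id", 1), ("v", 9)], [("id", 3)]])

def Spec_isNewDeviceId (device_id : Int) (json_contents : List (List (String × Int))) (out : Bool) : Prop := out = isNewDeviceId_alt device_id json_contents
instance (device_id : Int) (json_contents : List (List (String × Int))) (out : Bool) : Decidable (Spec_isNewDeviceId device_id json_contents out) := by unfold Spec_isNewDeviceId; infer_instance

-- ===== CLAIM =====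
def Claim_equal_isNewDeviceId : Prop := ∀ (device_id : Int) (json_contents : List (List (String × Int))), Dom_isNewDeviceId device_id json_contents → Pre_isNewDeviceId device_id json_contents → Spec_isNewDeviceId device_id json_contents (isNewDeviceId device_id json_contents)

-- ===== LEMMAS AND PROOFS =====

-- binary-search invariant: when ids is nondecreasing below hi, the result r is the
-- lower bound of x in ids[lo:hi]
theorem pvBsearchAux_spec (ids : List Int) (x : Int) : ∀ (fuel lo hi : Nat),
    hi - lo ≤ fuel →
    (∀ p q, p ≤ q → q < hi → ids.getD p 0 ≤ ids.getD q 0) → lo ≤ hi →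
    lo ≤ pvBsearchAux fuel ids x lo hi ∧ pvBsearchAux fuel ids x lo hi ≤ hi ∧
    (∀ i, lo ≤ i → i < pvBsearchAux fuel ids x lo hi → ids.getD i 0 < x) ∧
    (∀ i, pvBsearchAux fuel ids x lo hi ≤ i → i < hi → x ≤ ids.getD i 0) := by
  intro fuel
  induction fuel with
  | zero =>
    intro lo hi hfuel hsort hlo
    have : hi = lo := by omega
    subst this
    simp only [pvBsearchAux]
    exact ⟨le_refl _, le_refl _, by omega, by omega⟩
  | succ fuel ih =>
    intro lo hi hfuel hsort hlo
    by_cases h : lo < hi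
    · rw [pvBsearchAux, if_pos h]
      by_cases hlt : ids.getD ((lo + hi) / 2) 0 < x
      · rw [if_pos hlt]
        obtain ⟨h1, h2, h3, h4⟩ := ih ((lo + hi) / 2 + 1) hi (by omega) hsort (by omega)
        refine ⟨by omega, h2, ?_, h4⟩
        intro i hi1 hi2
        by_cases hc : (lo + hi) / 2 + 1 ≤ i
        · exact h3 i hc hi2
        · calc ids.getD i 0 ≤ ids.getD ((lo + hi) / 2) 0 :=
                hsort i ((lo + hi) / 2) (by omega) (by omega)
            _ < x := hlt
      · rw [if_neg hlt]
        obtain ⟨h1, h2, h3, h4⟩ := ih lo ((lo + hi) / 2) (by omega)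
          (fun p q hpq hq => hsort p q hpq (by omega)) (by omega)
        refine ⟨h1, by omega, h3, ?_⟩
        intro i hi1 hi2
        by_cases hc : i < (lo + hi) / 2
        · exact h4 i hi1 hc
        · calc x ≤ ids.getD ((lo + hi) / 2) 0 := le_of_not_gt hlt
            _ ≤ ids.getD i 0 := hsort ((lo + hi) / 2) i (by omega) (by omega)
    · rw [pvBsearchAux, if_neg h]
      exact ⟨le_refl _, hlo, by omega, by omega⟩

theorem pvBsearch_spec (ids : List Int) (x : Int) (lo hi : Nat)
    (hsort : ∀ p q, p ≤ q → q < hi → ids.getD p 0 ≤ ids.getD q 0) (hlo : lo ≤ hi) :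
    lo ≤ pvBsearch ids x lo hi ∧ pvBsearch ids x lo hi ≤ hi ∧
    (∀ i, lo ≤ i → i < pvBsearch ids x lo hi → ids.getD i 0 < x) ∧
    (∀ i, pvBsearch ids x lo hi ≤ i → i < hi → x ≤ ids.getD i 0) :=
  pvBsearchAux_spec ids x (hi - lo) lo hi (le_refl _) hsort hlo

theorem isNewDeviceId_eq_alt (d : Int) (jc : List (List (String × Int))) :
    isNewDeviceId d jc = isNewDeviceId_alt d jc := by
  unfold isNewDeviceId isNewDeviceId_alt
  simp only [PySem.List.foldl_append_singleton_eq_map, List.nil_append]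
  set ids := PySem.List.sorted (jc.filterMap pvGetId) (fun x => x) false with hids
  have hmono : ∀ p q, p ≤ q → q < ids.length → ids.getD p 0 ≤ ids.getD q 0 := by
    intro p q hpq hq
    have hp : p < ids.length := by omega
    rw [List.getD_eq_getElem ids 0 hp, List.getD_eq_getElem ids 0 hq]
    exact PySem.List.sorted_id_getElem_mono (jc.filterMap pvGetId) hpq hq
  obtain ⟨h1, h2, h3, h4⟩ := pvBsearch_spec ids d 0 ids.length hmono (Nat.zero_le _)
  set r := pvBsearch ids d 0 ids.length with hr
  have hmem : (some d ∈ jc.map pvGetId) ↔ (r < ids.length ∧ ids.getD r 0 = d) := by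
    constructor
    · intro hin
      obtain ⟨dev, hdev, hd⟩ := List.mem_map.mp hin
      have hdm : d ∈ ids := by
        rw [hids, PySem.List.mem_sorted]
        exact List.mem_filterMap.mpr ⟨dev, hdev, hd⟩
      obtain ⟨i, hilen, hie⟩ := List.mem_iff_getElem.mp hdm
      have hir : ¬ i < r := by
        intro hlt
        have := h3 i (Nat.zero_le _) hlt
        rw [List.getD_eq_getElem ids 0 hilen, hie] at this
        exact lt_irrefl d this
      have hrlen : r < ids.length := by omega
      refine ⟨hrlen, le_antisymm ?_ ?_⟩
      · have := hmono r i (by omega) hilen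
        rwa [List.getD_eq_getElem ids 0 hilen, hie] at this
      · exact h4 r (le_refl _) hrlen
    · rintro ⟨hrlen, hre⟩
      have : d ∈ ids := by
        rw [← hre, List.getD_eq_getElem ids 0 hrlen]
        exact List.getElem_mem hrlen
      rw [hids, PySem.List.mem_sorted] at this
      obtain ⟨dev, hdev, hd⟩ := List.mem_filterMap.mp this
      exact List.mem_map.mpr ⟨dev, hdev, hd⟩
  by_cases hin : some d ∈ jc.map pvGetId
  · obtain ⟨hrlen, hre⟩ := hmem.mp hin
    rw [List.getD_eq_getElem ids 0 hrlen] at hre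
    simp [hin, hrlen, hre]
  · have := fun h1 h2 => hin (hmem.mpr ⟨h1, h2⟩)
    by_cases hrlen : r < ids.length
    · have hne : ¬ ids[r] = d := fun he =>
        this hrlen (by rw [List.getD_eq_getElem ids 0 hrlen]; exact he)
      simp [hin, hrlen, hne]
    · simp [hin, hrlen]

-- ===== VERDICT =====
theorem isNewDeviceId_spec : Claim_equal_isNewDeviceId := by
  intro d jc _ _
  exact isNewDeviceId_eq_alt d jc
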